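-- pv_equiv track=rewrite | github.com/gaju91/dsa-journey | algorithms/01-two-pointers/problems/07_triplets_smaller_sum.py | countTripletsExplicit
-- ===== SOURCE A (Python) =====
-- from typing import List
--
-- def countTripletsExplicit(nums: List[int], target: int) -> int:
--     """
--     Strategy: Count each valid combination explicitly
--
--     Less efficient but easier to understand
--     """
--     nums.sort()
--     n = len(nums)
--     count = 0
--
--     for i in range(n - 2):
--         for j in range(i + 1, n - 1):
--             for k in range(j + 1, n):
--                 if nums[i] + nums[j] + nums[k] < target:
--                     count += 1
--                 else:
--                     break  # Since sorted, all further k will be larger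
--
--     return count
-- ===== SOURCE B (Python) =====
-- from typing import List
--
-- def countTripletsExplicit(nums: List[int], target: int) -> int:
--     """Sort + two-pointer: for each i, count pairs (j,k) with nums[j]+nums[k] < target-nums[i]."""
--     nums.sort()
--     n = len(nums)
--     count = 0
--     for i in range(n - 2):
--         need = target - nums[i]
--         lo, hi = i + 1, n - 1
--         while lo < hi:
--             if nums[lo] + nums[hi] < need:
--                 count += hi - lo
--                 lo += 1
--             else:
--                 hi -= 1
--     return count
-- ===== Notes on version B (the rewrite author's own statement) =====
-- stated objective: faster
-- what changed: Replaced the triple nested loop (with break) by sort + two-pointer pair counting per first index: for each i, lo/hi pointers count all pairs with nums[lo]+nums[hi] < target-nums[i] in one linear sweep.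
import Mathlib
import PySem

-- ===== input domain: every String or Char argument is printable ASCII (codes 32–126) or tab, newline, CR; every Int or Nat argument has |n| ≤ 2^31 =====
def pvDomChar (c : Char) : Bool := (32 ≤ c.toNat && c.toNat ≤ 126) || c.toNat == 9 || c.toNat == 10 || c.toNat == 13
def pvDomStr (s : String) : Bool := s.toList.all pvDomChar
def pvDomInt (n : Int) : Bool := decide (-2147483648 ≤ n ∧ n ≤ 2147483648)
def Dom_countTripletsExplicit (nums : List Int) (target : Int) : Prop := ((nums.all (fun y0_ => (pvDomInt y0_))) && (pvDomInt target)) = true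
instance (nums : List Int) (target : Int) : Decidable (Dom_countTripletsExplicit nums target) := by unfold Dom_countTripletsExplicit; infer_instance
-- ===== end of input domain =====

-- B replaces A's O(n^3) triple loop by the classical sort + two-pointer pair count (O(n^2)).
-- Both A and B sort the caller's list in place (same side effect); the theorems are about the return value.

-- ===== PORT A =====
-- innermost loop: `for k in range(j+1, n): if s[i]+s[j]+s[k] < target: count += 1 else: break`
-- (the guard k < n makes every access in range, so `getD _ 0` is exact)
def pvLoopK (s : List Int) (t : Int) (n : Nat) (vi vj : Int) (k : Nat) : Int :=
  if k < n then
    if vi + vj + s.getD k 0 < t then 1 + pvLoopK s t n vi vj (k + 1) else 0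
  else 0
termination_by n - k

-- middle loop: `for j in range(i+1, n-1): …`
def pvLoopJ (s : List Int) (t : Int) (n : Nat) (vi : Int) (j : Nat) : Int :=
  if j < n - 1 then pvLoopK s t n vi (s.getD j 0) (j + 1) + pvLoopJ s t n vi (j + 1) else 0
termination_by (n - 1) - j

def countTripletsExplicit (nums : List Int) (target : Int) : Int :=
  let s := PySem.List.sorted nums (fun x => x)
  let n := s.length
  (List.range (n - 2)).foldl (fun c i => c + pvLoopJ s target n (s.getD i 0) (i + 1)) 0

-- ===== PORT B =====
-- `while lo < hi: if s[lo]+s[hi] < need: count += hi-lo; lo += 1 else: hi -= 1`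
def pvTwoPtr (s : List Int) (need : Int) (lo hi : Nat) : Int :=
  if lo < hi then
    if s.getD lo 0 + s.getD hi 0 < need then ((hi : Int) - (lo : Int)) + pvTwoPtr s need (lo + 1) hi
    else pvTwoPtr s need lo (hi - 1)
  else 0
termination_by hi - lo

def countTripletsExplicit_alt (nums : List Int) (target : Int) : Int :=
  let s := PySem.List.sorted nums (fun x => x)
  let n := s.length
  (List.range (n - 2)).foldl (fun c i => c + pvTwoPtr s (target - s.getD i 0) (i + 1) (n - 1)) 0

-- ===== PRECONDITION & SPEC =====
def Spec_countTripletsExplicit (nums : List Int) (target : Int) (out : Int) : Prop := out = countTripletsExplicit_alt nums target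
instance (nums : List Int) (target : Int) (out : Int) : Decidable (Spec_countTripletsExplicit nums target out) := by unfold Spec_countTripletsExplicit; infer_instance

-- ===== CLAIM (what is proved, stated in full; the proofs are below) =====
def Claim_equal_countTripletsExplicit : Prop := ∀ (nums : List Int) (target : Int), Dom_countTripletsExplicit nums target → Spec_countTripletsExplicit nums target (countTripletsExplicit nums target)

-- ===== LEMMAS AND PROOFS =====

-- number of k in [j+1, ub) with s[j] + s[k] < need
def pvCnt (s : List Int) (need : Int) (j ub : Nat) : Nat :=
  ((Finset.Ico (j + 1) ub).filter (fun k => s.getD j 0 + s.getD k 0 < need)).card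

-- monotone-access abbreviation for a sorted list
def pvMono (s : List Int) : Prop := ∀ p q : Nat, p ≤ q → q < s.length → s.getD p 0 ≤ s.getD q 0

lemma pvMono_sorted (nums : List Int) : pvMono (PySem.List.sorted nums (fun x => x)) := by
  intro p q hpq hq
  rw [List.getD_eq_getElem _ _ (lt_of_le_of_lt hpq hq), List.getD_eq_getElem _ _ hq]
  exact PySem.List.sorted_id_getElem_mono nums hpq hq

lemma pvLoopK_eq (s : List Int) (t vi : Int) (j : Nat) (hm : pvMono s) :
    ∀ fuel k, s.length - k = fuel →
      pvLoopK s t s.length vi (s.getD j 0) k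
        = (((Finset.Ico k s.length).filter (fun m => s.getD j 0 + s.getD m 0 < t - vi)).card : Int) := by
  intro fuel
  induction fuel with
  | zero =>
    intro k hk
    have hk' : ¬ k < s.length := by omega
    rw [pvLoopK]
    simp [hk', Finset.Ico_eq_empty (by omega : ¬ k < s.length)]
  | succ fuel ih =>
    intro k hk
    have hklt : k < s.length := by omega
    have hins : insert k (Finset.Ico (k + 1) s.length) = Finset.Ico k s.length :=
      Finset.insert_Ico_add_one_left_eq_Ico hklt
    rw [pvLoopK]
    by_cases hc : vi + s.getD j 0 + s.getD k 0 < t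
    · have hc' : s.getD j 0 + s.getD k 0 < t - vi := by omega
      rw [if_pos hklt, if_pos hc, ih (k + 1) (by omega)]
      rw [← hins, Finset.filter_insert, if_pos hc',
        Finset.card_insert_of_notMem (by simp)]
      push_cast; ring
    · have hemp : (Finset.Ico k s.length).filter (fun m => s.getD j 0 + s.getD m 0 < t - vi) = ∅ := by
        apply Finset.filter_eq_empty_iff.mpr
        intro m hmIco
        simp only [Finset.mem_Ico] at hmIco
        have := hm k m hmIco.1 hmIco.2
        omega
      rw [if_pos hklt, if_neg hc, hemp]
      simp

lemma pvLoopJ_eq (s : List Int) (t vi : Int) (hm : pvMono s) :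
    ∀ fuel j, (s.length - 1) - j = fuel →
      pvLoopJ s t s.length vi j
        = ((∑ j' ∈ Finset.Ico j (s.length - 1), pvCnt s (t - vi) j' s.length : Nat) : Int) := by
  intro fuel
  induction fuel with
  | zero =>
    intro j hj
    have hj' : ¬ j < s.length - 1 := by omega
    rw [pvLoopJ]
    simp [hj', Finset.Ico_eq_empty (by omega : ¬ j < s.length - 1)]
  | succ fuel ih =>
    intro j hj
    have hjlt : j < s.length - 1 := by omega
    rw [pvLoopJ, if_pos hjlt, ih (j + 1) (by omega),
      pvLoopK_eq s t vi j hm (s.length - (j + 1)) (j + 1) rfl]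
    rw [← Finset.insert_Ico_add_one_left_eq_Ico hjlt, Finset.sum_insert (by simp)]
    unfold pvCnt
    push_cast; ring

lemma pvTwoPtr_eq (s : List Int) (need : Int) (hm : pvMono s) :
    ∀ d lo hi, hi - lo ≤ d → hi < s.length →
      pvTwoPtr s need lo hi = ((∑ j ∈ Finset.Ico lo (hi + 1), pvCnt s need j (hi + 1) : Nat) : Int) := by
  intro d
  induction d with
  | zero =>
    intro lo hi hd hlen
    have hle : hi ≤ lo := by omega
    rw [pvTwoPtr, if_neg (by omega)]
    have hz : ∀ j ∈ Finset.Ico lo (hi + 1), pvCnt s need j (hi + 1) = 0 := by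
      intro j hj
      simp only [Finset.mem_Ico] at hj
      unfold pvCnt
      rw [Finset.Ico_eq_empty (by omega : ¬ j + 1 < hi + 1)]
      simp
    rw [Finset.sum_congr rfl hz]
    simp
  | succ d ih =>
    intro lo hi hd hlen
    by_cases hlt : lo < hi
    · rw [pvTwoPtr, if_pos hlt]
      by_cases hc : s.getD lo 0 + s.getD hi 0 < need
      · -- all k in (lo, hi] pair with lo: cnt lo (hi+1) = hi - lo
        have hcnt : pvCnt s need lo (hi + 1) = hi - lo := by
          unfold pvCnt
          have hfull : (Finset.Ico (lo + 1) (hi + 1)).filter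
              (fun k => s.getD lo 0 + s.getD k 0 < need) = Finset.Ico (lo + 1) (hi + 1) := by
            apply Finset.filter_eq_self.mpr
            intro k hk
            simp only [Finset.mem_Ico] at hk
            have := hm k hi (by omega) hlen
            omega
          rw [hfull, Nat.card_Ico]
          omega
        rw [if_pos hc, ih (lo + 1) hi (by omega) hlen]
        rw [← Finset.insert_Ico_add_one_left_eq_Ico (by omega : lo < hi + 1),
          Finset.sum_insert (by simp), hcnt]
        push_cast [Nat.cast_sub (le_of_lt hlt)]; ring
      · -- no pair uses hi: drop it
        have hhi1 : hi - 1 + 1 = hi := by omega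
        rw [if_neg hc, ih lo (hi - 1) (by omega) (by omega), hhi1]
        have hcongr : ∀ j ∈ Finset.Ico lo hi, pvCnt s need j hi = pvCnt s need j (hi + 1) := by
          intro j hj
          simp only [Finset.mem_Ico] at hj
          unfold pvCnt
          congr 1
          apply Finset.ext
          intro m
          simp only [Finset.mem_filter, Finset.mem_Ico]
          constructor
          · rintro ⟨⟨h1, h2⟩, h3⟩; exact ⟨⟨h1, by omega⟩, h3⟩
          · rintro ⟨⟨h1, h2⟩, h3⟩
            refine ⟨⟨h1, ?_⟩, h3⟩
            rcases Nat.lt_or_ge m hi with h | h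
            · exact h
            · have hmhi : m = hi := by omega
              have := hm lo j hj.1 (by omega)
              subst hmhi
              omega
        rw [Finset.sum_congr rfl hcongr,
          Finset.sum_Ico_succ_top (by omega : lo ≤ hi) (fun j => pvCnt s need j (hi + 1))]
        have htop : pvCnt s need hi (hi + 1) = 0 := by
          unfold pvCnt
          rw [Finset.Ico_self]
          simp
        rw [htop]
        push_cast; ring
    · rw [pvTwoPtr, if_neg hlt]
      have hz : ∀ j ∈ Finset.Ico lo (hi + 1), pvCnt s need j (hi + 1) = 0 := by
        intro j hj
        simp only [Finset.mem_Ico] at hj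
        unfold pvCnt
        rw [Finset.Ico_eq_empty (by omega : ¬ j + 1 < hi + 1)]
        simp
      rw [Finset.sum_congr rfl hz]
      simp

-- per outer-loop-index agreement of the two inner computations
lemma pvBody_eq (s : List Int) (t : Int) (i : Nat) (hm : pvMono s) (hi : i < s.length - 2) :
    pvLoopJ s t s.length (s.getD i 0) (i + 1)
      = pvTwoPtr s (t - s.getD i 0) (i + 1) (s.length - 1) := by
  have hn : 3 ≤ s.length := by omega
  have h1 : s.length - 1 + 1 = s.length := by omega
  rw [pvLoopJ_eq s t (s.getD i 0) hm ((s.length - 1) - (i + 1)) (i + 1) rfl,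
    pvTwoPtr_eq s (t - s.getD i 0) hm ((s.length - 1) - (i + 1)) (i + 1) (s.length - 1) le_rfl (by omega),
    h1]
  have := Finset.sum_Ico_succ_top (by omega : i + 1 ≤ s.length - 1)
    (fun j => pvCnt s (t - s.getD i 0) j s.length)
  rw [h1] at this
  have htop : pvCnt s (t - s.getD i 0) (s.length - 1) s.length = 0 := by
    unfold pvCnt
    rw [h1, Finset.Ico_self]
    simp
  rw [this, htop]
  simp

-- ===== VERDICT (by name: the statement is the Claim_ definition above) =====
theorem countTripletsExplicit_spec : Claim_equal_countTripletsExplicit := by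
  intro nums target _
  unfold Spec_countTripletsExplicit countTripletsExplicit countTripletsExplicit_alt
  apply PySem.List.foldl_congr_mem
  intro acc i hi
  rw [List.mem_range] at hi
  rw [pvBody_eq (PySem.List.sorted nums (fun x => x)) target i (pvMono_sorted nums) hi]
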